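-- pv_equiv track=rewrite | github.com/Qenszu/workshop | python/WDI/zestaw_3/109.py | sum_poem
-- ===== SOURCE A (Python) =====
-- def sum_poem(T):
--     size = len(T)
--     maxi = 0
--
--     for i in range(size-1):
--         sume = 0
--         for j in range(10):
--             if i+j == size:
--                 break
--
--             sume += T[i+j]
--         #end for
--         maxi = max(sume, maxi)
--     #end for
--
--     return maxi
-- ===== SOURCE B (Python) =====
-- def sum_poem(T):
--     size = len(T)
--     P = [0]
--     for x in T:
--         P.append(P[-1] + x)
--     maxi = 0
--     for i in range(size - 1):
--         end = min(i + 10, size)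
--         maxi = max(P[end] - P[i], maxi)
--     return maxi
-- ===== Notes on version B (the rewrite author's own statement) =====
-- stated objective: faster
-- what changed: B builds a prefix-sum table once and answers each window sum as P[end]-P[i] in O(1), instead of A's inner loop re-summing up to 10 elements per start index.
import Mathlib
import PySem

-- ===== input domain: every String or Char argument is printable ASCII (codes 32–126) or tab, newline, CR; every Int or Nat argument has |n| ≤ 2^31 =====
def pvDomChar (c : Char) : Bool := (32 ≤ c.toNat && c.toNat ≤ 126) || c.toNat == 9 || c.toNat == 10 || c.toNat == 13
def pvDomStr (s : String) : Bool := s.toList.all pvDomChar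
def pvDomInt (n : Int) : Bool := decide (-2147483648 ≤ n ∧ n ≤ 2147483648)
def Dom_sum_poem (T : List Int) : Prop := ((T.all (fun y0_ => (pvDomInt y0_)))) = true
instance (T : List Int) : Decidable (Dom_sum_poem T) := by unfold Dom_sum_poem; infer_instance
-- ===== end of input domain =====

-- B replaces A's inner re-summation of each (≤10)-element window by a prefix-sum
-- table built once, each window sum becoming one subtraction (objective: faster).

-- ===== PORT A =====
-- inner 'for j in range(10)' loop with its break (i+j == size) and running sum
def sumPoemInner (T : List Int) (size i : Int) : List Int → Int → Int
  | [], sume => sume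
  | j :: rest, sume =>
      if i + j = size then sume
      else sumPoemInner T size i rest (sume + (PySem.List.pyGet? T (i + j)).getD 0)

def sum_poem (T : List Int) : Int :=
  let size : Int := T.length
  (PySem.List.pyRange 0 (size - 1) 1).foldl
    (fun maxi i => max (sumPoemInner T size i (PySem.List.pyRange 0 10 1) 0) maxi) 0

-- ===== PORT B =====
-- P = [0]; for x in T: P.append(P[-1] + x)
def sumPoemPrefix (T : List Int) : List Int :=
  T.foldl (fun P x => P ++ [(PySem.List.pyGet? P (-1)).getD 0 + x]) [0]

def sum_poem_alt (T : List Int) : Int :=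
  let size : Int := T.length
  let P := sumPoemPrefix T
  (PySem.List.pyRange 0 (size - 1) 1).foldl
    (fun maxi i =>
      max ((PySem.List.pyGet? P (min (i + 10) size)).getD 0
            - (PySem.List.pyGet? P i).getD 0) maxi) 0

-- ===== PRECONDITION & SPEC =====
def Spec_sum_poem (T : List Int) (out : Int) : Prop := out = sum_poem_alt T
instance (T : List Int) (out : Int) : Decidable (Spec_sum_poem T out) := by unfold Spec_sum_poem; infer_instance

-- ===== CLAIM (what is proved, stated in full; the proofs are below) =====
def Claim_equal_sum_poem : Prop := ∀ (T : List Int), Dom_sum_poem T → Spec_sum_poem T (sum_poem T)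

-- ===== LEMMAS AND PROOFS =====

-- the prefix table is the list of take-sums
theorem sumPoemPrefix_go (T : List Int) : ∀ (P : List Int) (l : Int),
    (PySem.List.pyGet? P (-1)).getD 0 = l →
    T.foldl (fun P x => P ++ [(PySem.List.pyGet? P (-1)).getD 0 + x]) P
      = P ++ (List.range T.length).map (fun k => l + (T.take (k + 1)).sum) := by
  induction T with
  | nil => intro P l _; simp
  | cons x rest ih =>
      intro P l hl
      simp only [List.foldl_cons, hl]
      rw [ih (P ++ [l + x]) (l + x) (by simp [PySem.List.pyGet?_neg_one_append_singleton])]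
      rw [List.length_cons, List.range_succ_eq_map]
      simp only [List.map_cons, List.map_map, List.take_succ_cons, List.sum_cons,
        List.take_zero, List.sum_nil, List.append_assoc, List.singleton_append]
      congr 2
      · omega
      · refine List.map_congr_left fun k _ => ?_
        simp only [Function.comp_apply, Nat.succ_eq_add_one]
        ring

theorem sumPoemPrefix_eq (T : List Int) :
    sumPoemPrefix T = (List.range (T.length + 1)).map (fun k => (T.take k).sum) := by
  unfold sumPoemPrefix
  rw [sumPoemPrefix_go T [0] 0 (by decide)]
  rw [List.range_succ_eq_map]
  simp

theorem sumPoemPrefix_get (T : List Int) (k : Int) (h0 : 0 ≤ k) (h1 : k ≤ (T.length : Int)) :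
    (PySem.List.pyGet? (sumPoemPrefix T) k).getD 0 = (T.take k.toNat).sum := by
  rw [sumPoemPrefix_eq]
  rw [PySem.List.pyGet?_of_nonneg _ h0]
  rw [List.getElem?_eq_getElem (by simpa using by omega)]
  simp

-- the inner loop of A computes a window of the prefix sums
theorem sumPoemInner_spec (T : List Int) (i : Int) (hi : 0 ≤ i) :
    ∀ (c : Nat) (j s : Int), j = 10 - (c : Int) → 0 ≤ j → i + j ≤ (T.length : Int) →
    sumPoemInner T T.length i (PySem.List.pyRange j 10 1) s
      = s + ((T.take (min (i + 10) (T.length : Int)).toNat).sum - (T.take (i + j).toNat).sum) := by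
  intro c
  induction c with
  | zero =>
      intro j s hj _ hle
      subst hj
      rw [PySem.List.pyRange_one_eq_nil (by omega)]
      simp only [sumPoemInner]
      have h10 : i + (10 - (0:Nat)) = i + 10 := by norm_num
      have hmin : min (i + 10) (T.length : Int) = i + 10 := by omega
      rw [h10, hmin]; ring
  | succ c ih =>
      intro j s hj hj0 hle
      have hjlt : j < 10 := by omega
      rw [PySem.List.pyRange_one_cons hjlt]
      simp only [sumPoemInner]
      by_cases hend : i + j = (T.length : Int)
      · rw [if_pos hend]
        have : min (i + 10) (T.length : Int) = (T.length : Int) := by omega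
        rw [this, hend]
        simp
      · rw [if_neg hend]
        have hlt : i + j < (T.length : Int) := by omega
        rw [ih (j + 1) _ (by omega) (by omega) (by omega)]
        have hnat : (i + j).toNat < T.length := by omega
        rw [PySem.List.pyGet?_eq_some_getElem T (by omega) hlt]
        have hsum : (T.take ((i + j).toNat + 1)).sum
            = (T.take (i + j).toNat).sum + T[(i + j).toNat] :=
          List.sum_take_succ T _ hnat
        have : (i + (j + 1)).toNat = (i + j).toNat + 1 := by omega
        rw [this, hsum]
        simp only [Option.getD_some]
        ring

-- ===== VERDICT (by name: the statement is the Claim_ definition above) =====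
theorem sum_poem_spec : Claim_equal_sum_poem := by
  intro T _
  unfold Spec_sum_poem sum_poem sum_poem_alt
  dsimp only
  refine PySem.List.foldl_congr_mem _ _ _ _ ?_
  intro maxi i hmem
  rw [PySem.List.mem_pyRange_one] at hmem
  obtain ⟨hi0, hi1⟩ := hmem
  have hiT : i < (T.length : Int) := by omega
  rw [sumPoemInner_spec T i hi0 10 0 0 (by norm_num) (by norm_num) (by omega)]
  rw [sumPoemPrefix_get T (min (i + 10) (T.length : Int)) (by omega) (by omega)]
  rw [sumPoemPrefix_get T i hi0 (by omega)]
  simp
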